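-- pv_equiv track=rewrite | github.com/bing0i/id3-decision-tree | main.py | countValuesByRow
-- ===== SOURCE A (Python) =====
-- def countValuesByRow(attribute, targetAttribute):
--     resultValues = {}
--     for index, targetValue in enumerate(targetAttribute):
--         if attribute[index] not in resultValues.keys():
--             resultValues[attribute[index]] = {targetValue: 1}
--         else:
--             if targetValue not in resultValues[attribute[index]]:
--                 resultValues[attribute[index]][targetValue] = 1
--             else:
--                 resultValues[attribute[index]][targetValue] += 1
--
--     return resultValues
-- ===== SOURCE B (Python) =====
-- def countValuesByRow(attribute, targetAttribute):
--     groups = {}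
--     for index, targetValue in enumerate(targetAttribute):
--         groups.setdefault(attribute[index], []).append(targetValue)
--     result = {}
--     for a, vals in groups.items():
--         counts = {}
--         for v in vals:
--             counts[v] = counts.get(v, 0) + 1
--         result[a] = counts
--     return result
-- ===== Notes on version B (the rewrite author's own statement) =====
-- stated objective: alternative
-- what changed: A fuses grouping and counting into one loop that branches on outer/inner dict membership and increments nested counters; B first groups target values per attribute value (setdefault/append), then builds each inner count dict in a second get-based pass over each group.
import Mathlib
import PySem

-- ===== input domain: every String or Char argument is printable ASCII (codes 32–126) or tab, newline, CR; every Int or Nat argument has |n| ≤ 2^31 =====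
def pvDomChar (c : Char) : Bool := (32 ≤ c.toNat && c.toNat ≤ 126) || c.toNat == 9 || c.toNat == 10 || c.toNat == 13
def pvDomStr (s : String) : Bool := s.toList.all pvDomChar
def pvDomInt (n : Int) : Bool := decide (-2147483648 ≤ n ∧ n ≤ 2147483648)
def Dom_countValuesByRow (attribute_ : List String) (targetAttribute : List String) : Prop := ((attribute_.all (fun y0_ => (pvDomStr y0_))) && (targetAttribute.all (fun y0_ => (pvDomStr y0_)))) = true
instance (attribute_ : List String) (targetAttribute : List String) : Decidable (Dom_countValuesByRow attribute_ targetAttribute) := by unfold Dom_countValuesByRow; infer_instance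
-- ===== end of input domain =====

-- B replaces A's fused count-increment loop by a group-first (setdefault/append) pass
-- followed by a per-group counting pass; equivalence of the RETURN value is proved below.

-- ===== PORT A =====
-- one iteration of A's loop body: index/targetValue pair, nested membership branches
def aStep (attribute_ : List String) (d : PySem.Dict String (PySem.Dict String Int)) (p : Int × String) : PySem.Dict String (PySem.Dict String Int) :=
  let a := PySem.List.pyGetD attribute_ p.1 ""   -- attribute[index]; in range under Pre_
  if !(d.contains a) then
    d.insert a (PySem.Dict.empty.insert p.2 1)
  else
    let inner := d.getD a PySem.Dict.empty
    if !(inner.contains p.2) then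
      d.insert a (inner.insert p.2 1)
    else
      d.insert a (inner.insert p.2 (inner.getD p.2 0 + 1))

def countValuesByRow (attribute_ : List String) (targetAttribute : List String) : List (String × List (String × Int)) :=
  ((PySem.List.enumerate targetAttribute 0).foldl (aStep attribute_) PySem.Dict.empty).items.map
    (fun p => (p.1, p.2.items))

-- ===== PORT B =====
-- groups.setdefault(attribute[index], []).append(t)  ==  Dict.modify with default []
def bStep (attribute_ : List String) (g : PySem.Dict String (List String)) (p : Int × String) : PySem.Dict String (List String) :=
  g.modify (PySem.List.pyGetD attribute_ p.1 "") [] (fun vs => vs ++ [p.2])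

def countValuesByRow_alt (attribute_ : List String) (targetAttribute : List String) : List (String × List (String × Int)) :=
  ((PySem.List.enumerate targetAttribute 0).foldl (bStep attribute_) PySem.Dict.empty).items.map
    (fun p => (p.1, (p.2.foldl (fun c v => c.insert v (c.getD v 0 + 1)) PySem.Dict.empty).items))

-- ===== PRECONDITION & SPEC =====
-- Both programs index attribute[index] for every index of targetAttribute: they raise
-- IndexError whenever attribute is shorter than targetAttribute; exactly those inputs are excluded.
def Pre_countValuesByRow (attribute_ : List String) (targetAttribute : List String) : Prop :=
  targetAttribute.length ≤ attribute_.length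
instance (attribute_ : List String) (targetAttribute : List String) : Decidable (Pre_countValuesByRow attribute_ targetAttribute) := by unfold Pre_countValuesByRow; infer_instance

def pvWitness_countValuesByRow : List String × List String := (["a", "b", "a"], ["x", "y", "x"])

def Spec_countValuesByRow (attribute_ : List String) (targetAttribute : List String) (out : List (String × List (String × Int))) : Prop := out = countValuesByRow_alt attribute_ targetAttribute
instance (attribute_ : List String) (targetAttribute : List String) (out : List (String × List (String × Int))) : Decidable (Spec_countValuesByRow attribute_ targetAttribute out) := by unfold Spec_countValuesByRow; infer_instance

-- ===== CLAIM (what is proved, stated in full; the proofs are below) =====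
def Claim_equal_countValuesByRow : Prop := ∀ (attribute_ : List String) (targetAttribute : List String), Dom_countValuesByRow attribute_ targetAttribute → Pre_countValuesByRow attribute_ targetAttribute → Spec_countValuesByRow attribute_ targetAttribute (countValuesByRow attribute_ targetAttribute)

-- ===== LEMMAS AND PROOFS =====

-- A's step with the attribute value already looked up
def aStepP (d : PySem.Dict String (PySem.Dict String Int)) (q : String × String) : PySem.Dict String (PySem.Dict String Int) :=
  let a := q.1
  if !(d.contains a) then
    d.insert a (PySem.Dict.empty.insert q.2 1)
  else
    let inner := d.getD a PySem.Dict.empty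
    if !(inner.contains q.2) then
      d.insert a (inner.insert q.2 1)
    else
      d.insert a (inner.insert q.2 (inner.getD q.2 0 + 1))

-- B's step with the attribute value already looked up
def bStepP (g : PySem.Dict String (List String)) (q : String × String) : PySem.Dict String (List String) :=
  g.modify q.1 [] (fun vs => vs ++ [q.2])

-- the abstraction: a grouping dict, with every value list replaced by its Counter
def toA (g : PySem.Dict String (List String)) : PySem.Dict String (PySem.Dict String Int) :=
  PySem.Dict.mk (g.items.map (fun p => (p.1, PySem.Dict.counter p.2)))

theorem contains_toA (g : PySem.Dict String (List String)) (a : String) :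
    (toA g).contains a = g.contains a := by
  cases g with
  | mk l => simp [toA, PySem.Dict.contains, List.any_map, Function.comp_def]

theorem get?_toA (g : PySem.Dict String (List String)) (a : String) :
    (toA g).get? a = (g.get? a).map PySem.Dict.counter := by
  cases g with
  | mk l =>
    induction l with
    | nil => simp [toA]; rfl
    | cons h t ih =>
      obtain ⟨k, v⟩ := h
      by_cases hk : k = a
      · subst hk
        simp [toA, PySem.Dict.get?_mk_cons]
      · simpa [toA, PySem.Dict.get?_mk_cons, hk] using ih

theorem getD_toA (g : PySem.Dict String (List String)) (a : String) :
    (toA g).getD a PySem.Dict.empty = PySem.Dict.counter (g.getD a []) := by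
  simp only [PySem.Dict.getD, get?_toA]
  cases g.get? a <;> rfl

theorem insert_toA (g : PySem.Dict String (List String)) (a : String) (w : List String) :
    toA (g.insert a w) = (toA g).insert a (PySem.Dict.counter w) := by
  apply PySem.Dict.ext
  have hti : ∀ (x : PySem.Dict String (List String)),
      (toA x).items = x.items.map (fun p => (p.1, PySem.Dict.counter p.2)) := fun _ => rfl
  rw [hti, PySem.Dict.items_insert, PySem.Dict.items_insert, contains_toA, hti]
  by_cases h : g.contains a = true
  · simp only [h, if_pos, List.map_map]
    apply List.map_congr_left
    intro p _
    by_cases hp : p.1 = a <;> simp [hp]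
  · simp [h]

theorem aStepP_toA (g : PySem.Dict String (List String)) (q : String × String) :
    aStepP (toA g) q = toA (bStepP g q) := by
  obtain ⟨a, t⟩ := q
  have hmod : bStepP g (a, t) = g.insert a (g.getD a [] ++ [t]) := rfl
  rw [hmod, insert_toA, PySem.Dict.counter_append_singleton]
  by_cases h : g.contains a = true
  · have hinner : (toA g).getD a PySem.Dict.empty = PySem.Dict.counter (g.getD a []) :=
      getD_toA g a
    simp only [aStepP, contains_toA, h, Bool.not_true, Bool.false_eq_true, if_false, hinner]
    by_cases ht : (PySem.Dict.counter (g.getD a [])).contains t = true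
    · simp only [ht, Bool.not_true, Bool.false_eq_true, if_false]
      rfl
    · have h0 : (PySem.Dict.counter (g.getD a [])).getD t 0 = 0 :=
        PySem.Dict.getD_of_not_contains _ _ (by simpa using ht)
      simp only [ht, Bool.not_eq_true', if_true, PySem.Dict.modify, h0]
      norm_num
  · have hg : g.getD a [] = [] :=
      PySem.Dict.getD_of_not_contains _ _ (by simpa using h)
    simp only [aStepP, contains_toA, h, Bool.not_eq_true', if_true, hg]
    rfl

theorem foldl_aStepP_toA (pairs : List (String × String)) (g : PySem.Dict String (List String)) :
    pairs.foldl aStepP (toA g) = toA (pairs.foldl bStepP g) := by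
  induction pairs generalizing g with
  | nil => rfl
  | cons q qs ih => simp only [List.foldl_cons, aStepP_toA, ih]

-- generic: an enumerate-fold that only uses the index through attribute[index]
-- equals the fold over zip, whenever attribute is long enough
theorem enum_fold_eq_zip_fold {σ : Type} (f : σ → String × String → σ) (attribute_ : List String) :
    ∀ (tgt : List String) (s : Nat) (d : σ),
      s + tgt.length ≤ attribute_.length →
      (PySem.List.enumerate tgt (s : Int)).foldl
          (fun d p => f d (PySem.List.pyGetD attribute_ p.1 "", p.2)) d
        = ((attribute_.drop s).zip tgt).foldl f d := by
  intro tgt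
  induction tgt with
  | nil => intro s d _; simp [PySem.List.enumerate_nil]
  | cons t ts ih =>
    intro s d h
    have hs : s < attribute_.length := by simp at h; omega
    have hdrop : attribute_.drop s = attribute_[s] :: attribute_.drop (s + 1) :=
      List.drop_eq_getElem_cons hs
    rw [PySem.List.enumerate_cons, hdrop]
    simp only [List.zip_cons_cons, List.foldl_cons]
    have hget : PySem.List.pyGetD attribute_ ((s : Nat) : Int) "" = attribute_[s] := by
      simp only [PySem.List.pyGetD_natCast]
      simp [List.getD_eq_getElem?_getD, hs]
    rw [hget]
    have : ((s : Int) + 1) = ((s + 1 : Nat) : Int) := by push_cast; ring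
    rw [this, ih (s + 1) _ (by simp at h ⊢; omega)]

-- ===== VERDICT (by name: the statement is the Claim_ definition above) =====
theorem countValuesByRow_spec : Claim_equal_countValuesByRow := by
  intro attribute_ targetAttribute _ hpre
  unfold Spec_countValuesByRow countValuesByRow countValuesByRow_alt
  have hA : (PySem.List.enumerate targetAttribute (0 : Int)).foldl (aStep attribute_) PySem.Dict.empty
      = (attribute_.zip targetAttribute).foldl aStepP PySem.Dict.empty := by
    have hf : (fun (d : PySem.Dict String (PySem.Dict String Int)) (p : Int × String) =>
        aStepP d (PySem.List.pyGetD attribute_ p.1 "", p.2)) = aStep attribute_ := rfl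
    have := enum_fold_eq_zip_fold aStepP attribute_ targetAttribute 0 PySem.Dict.empty
      (by simpa using hpre)
    rw [hf] at this
    simpa using this
  have hB : (PySem.List.enumerate targetAttribute (0 : Int)).foldl (bStep attribute_) PySem.Dict.empty
      = (attribute_.zip targetAttribute).foldl bStepP PySem.Dict.empty := by
    have hg : (fun (g : PySem.Dict String (List String)) (p : Int × String) =>
        bStepP g (PySem.List.pyGetD attribute_ p.1 "", p.2)) = bStep attribute_ := rfl
    have := enum_fold_eq_zip_fold bStepP attribute_ targetAttribute 0 PySem.Dict.empty
      (by simpa using hpre)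
    rw [hg] at this
    simpa using this
  have hemp : (PySem.Dict.empty : PySem.Dict String (PySem.Dict String Int))
      = toA PySem.Dict.empty := rfl
  rw [hA, hB, hemp, foldl_aStepP_toA]
  simp only [toA, PySem.Dict.foldl_insert_getD_add_one_eq_counter, List.map_map]
  rfl
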